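-- pv_equiv track=rewrite | github.com/xPB1x/analizator | splits/splits_winorient.py | get_number_controls
-- ===== SOURCE A (Python) =====
-- def get_number_controls(controls): # +
--     """Список для вывода перегонов пользователю формат 'КП1 -> КП2'"""
--
--     control_list = []
--     last_control = None
--
--     for control in controls:
--         if control[:3].strip().isdigit():
--             control = control[:3].strip()
--             if last_control is None:
--                 control_list.append(f"Start -> {control}")
--                 last_control = control
--             else:
--                 control_list.append(f"{last_control} -> {control}")
--                 last_control = control
--
--     control_list.append(f"{last_control} -> Finish")
--     return control_list
-- ===== SOURCE B (Python) =====
-- def get_number_controls(controls):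
--     """Список для вывода перегонов пользователю формат 'КП1 -> КП2'"""
--     valid = [c[:3].strip() for c in controls if c[:3].strip().isdigit()]
--     last = valid[-1] if valid else None
--     legs = [f"{a} -> {b}" for a, b in zip(["Start"] + valid, valid)]
--     return legs + [f"{last} -> Finish"]
-- ===== Notes on version B (the rewrite author's own statement) =====
-- stated objective: simpler
-- what changed: Replaces A's single loop that threads a last_control accumulator and emits a leg per iteration by filter-then-pairwise: build the filtered label list once, join adjacent pairs with zip, and append the final leg from the list's last element (None when empty).
import Mathlib
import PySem

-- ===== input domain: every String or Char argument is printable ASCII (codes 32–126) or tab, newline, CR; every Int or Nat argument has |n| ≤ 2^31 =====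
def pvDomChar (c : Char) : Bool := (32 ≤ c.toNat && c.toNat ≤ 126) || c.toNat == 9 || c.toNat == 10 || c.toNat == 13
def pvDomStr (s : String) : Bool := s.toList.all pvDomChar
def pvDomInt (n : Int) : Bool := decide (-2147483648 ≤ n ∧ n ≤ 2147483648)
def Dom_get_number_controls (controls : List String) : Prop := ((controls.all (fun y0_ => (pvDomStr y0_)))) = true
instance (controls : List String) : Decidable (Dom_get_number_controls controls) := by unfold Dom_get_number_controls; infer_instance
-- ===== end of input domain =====

-- B replaces A's accumulator-threaded loop by filter-then-pairwise with a final leg from the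
-- filtered list's optional last element (objective: simpler).

-- shared rendering helpers: pvArrow x y is the f-string "{x} -> {y}", pvKey c is control[:3].strip()
def pvArrow (x y : String) : String := x ++ " -> " ++ y
def pvKey (c : String) : String := PySem.Str.strip (PySem.Str.slice c none (some 3))
-- f-string rendering of an Optional[str]: None prints as "None"
def pvShowOpt (o : Option String) : String := match o with | none => "None" | some l => l

-- ===== PORT A =====
def get_number_controls (controls : List String) : List String :=
  let st := controls.foldl (fun (st : List String × Option String) control =>
    if PySem.Str.strIsdigit (pvKey control) then
      match st.2 with
      | none => (st.1 ++ [pvArrow "Start" (pvKey control)], some (pvKey control))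
      | some last => (st.1 ++ [pvArrow last (pvKey control)], some (pvKey control))
    else st) (([] : List String), (none : Option String))
  st.1 ++ [pvArrow (pvShowOpt st.2) "Finish"]

-- ===== PORT B =====
-- valid = [c[:3].strip() for c in controls if c[:3].strip().isdigit()]
def pvF (c : String) : Option String :=
  if PySem.Str.strIsdigit (pvKey c) then some (pvKey c) else none

def get_number_controls_alt (controls : List String) : List String :=
  let valid := controls.filterMap pvF
  let last := valid.getLast?          -- valid[-1] if valid else None
  let legs := ((("Start" :: valid).zip valid).map (fun p => pvArrow p.1 p.2))
  legs ++ [pvArrow (pvShowOpt last) "Finish"]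

-- ===== PRECONDITION & SPEC =====
def Spec_get_number_controls (controls : List String) (out : List String) : Prop :=
  out = get_number_controls_alt controls
instance (controls : List String) (out : List String) : Decidable (Spec_get_number_controls controls out) := by
  unfold Spec_get_number_controls; infer_instance

-- ===== CLAIM =====
def Claim_equal_get_number_controls : Prop :=
  ∀ (controls : List String), Dom_get_number_controls controls →
    Spec_get_number_controls controls (get_number_controls controls)

-- ===== LEMMAS AND PROOFS =====

-- A's loop body, named for the proofs (definitionally equal to the lambda in get_number_controls)
def pvStep (st : List String × Option String) (control : String) : List String × Option String :=
  if PySem.Str.strIsdigit (pvKey control) then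
    match st.2 with
    | none => (st.1 ++ [pvArrow "Start" (pvKey control)], some (pvKey control))
    | some last => (st.1 ++ [pvArrow last (pvKey control)], some (pvKey control))
  else st

-- adjacent-pair join of a label sequence
def pvPairs : List String → List String
  | a :: b :: rest => pvArrow a b :: pvPairs (b :: rest)
  | _ => []

-- last element with default (simp-stable form of List.getLastD)
def pvLastD : List String → String → String
  | [], d => d
  | v :: vs, _ => pvLastD vs v

lemma pvA_eq (controls : List String) :
    get_number_controls controls =
      (let st := controls.foldl pvStep (([] : List String), (none : Option String))
       st.1 ++ [pvArrow (pvShowOpt st.2) "Finish"]) := rfl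

lemma pvZip_pairs (seq : List String) :
    (seq.zip seq.tail).map (fun p => pvArrow p.1 p.2) = pvPairs seq := by
  induction seq with
  | nil => rfl
  | cons a t ih =>
    cases t with
    | nil => rfl
    | cons b rest =>
      simp only [List.tail_cons, List.zip_cons_cons, List.map_cons, pvPairs]
      exact congrArg (List.cons _) (by simpa using ih)

lemma pvLoop_some (cs : List String) : ∀ (acc : List String) (last : String),
    cs.foldl pvStep (acc, some last)
      = (acc ++ pvPairs (last :: cs.filterMap pvF), some (pvLastD (cs.filterMap pvF) last)) := by
  induction cs with
  | nil => intro acc last; simp [pvPairs, pvLastD]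
  | cons c cs ih =>
    intro acc last
    by_cases h : PySem.Str.strIsdigit (pvKey c)
    · have hb : PySem.Chars.strIsdigit (pvKey c).toList = true := by simpa using h
      have hf : pvF c = some (pvKey c) := by simp [pvF, hb]
      have hs : pvStep (acc, some last) c = (acc ++ [pvArrow last (pvKey c)], some (pvKey c)) := by
        simp [pvStep, hb]
      simp only [List.foldl_cons, hs, List.filterMap_cons, hf]
      rw [ih]
      simp only [pvPairs, pvLastD, List.append_assoc, List.singleton_append]
    · have hb : PySem.Chars.strIsdigit (pvKey c).toList = false := by simpa using h
      have hf : pvF c = none := by simp [pvF, hb]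
      have hs : pvStep (acc, some last) c = (acc, some last) := by simp [pvStep, hb]
      simp only [List.foldl_cons, hs, List.filterMap_cons, hf]
      exact ih acc last

lemma pvLoop_none (cs : List String) : ∀ (acc : List String),
    cs.foldl pvStep (acc, none)
      = (match cs.filterMap pvF with
         | [] => (acc, none)
         | v :: vs => (acc ++ pvPairs ("Start" :: v :: vs), some (pvLastD (v :: vs) "Start"))) := by
  induction cs with
  | nil => intro acc; rfl
  | cons c cs ih =>
    intro acc
    by_cases h : PySem.Str.strIsdigit (pvKey c)
    · have hb : PySem.Chars.strIsdigit (pvKey c).toList = true := by simpa using h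
      have hf : pvF c = some (pvKey c) := by simp [pvF, hb]
      have hs : pvStep (acc, none) c = (acc ++ [pvArrow "Start" (pvKey c)], some (pvKey c)) := by
        simp [pvStep, hb]
      simp only [List.foldl_cons, hs, List.filterMap_cons, hf]
      rw [pvLoop_some]
      simp only [pvPairs, pvLastD, List.append_assoc, List.singleton_append]
    · have hb : PySem.Chars.strIsdigit (pvKey c).toList = false := by simpa using h
      have hf : pvF c = none := by simp [pvF, hb]
      have hs : pvStep (acc, none) c = (acc, none) := by simp [pvStep, hb]
      simp only [List.foldl_cons, hs, List.filterMap_cons, hf]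
      exact ih acc

lemma pvGetLast?_eq (vs : List String) : ∀ (v : String), (v :: vs).getLast? = some (pvLastD vs v) := by
  induction vs with
  | nil => intro v; rfl
  | cons b rest ih =>
    intro v
    rw [List.getLast?_cons_cons, ih b]
    rfl

theorem pv_main (controls : List String) :
    get_number_controls controls = get_number_controls_alt controls := by
  rw [pvA_eq]
  unfold get_number_controls_alt
  rw [pvLoop_none]
  cases hV : controls.filterMap pvF with
  | nil => simp [pvShowOpt]
  | cons v vs =>
    have hz : ((("Start" :: v :: vs).zip (v :: vs)).map (fun p => pvArrow p.1 p.2))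
        = pvPairs ("Start" :: v :: vs) := pvZip_pairs ("Start" :: v :: vs)
    simp only [hz, pvGetLast?_eq, pvShowOpt, List.nil_append]
    rfl

-- ===== VERDICT =====
theorem get_number_controls_spec : Claim_equal_get_number_controls := by
  intro controls _
  exact pv_main controls
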